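-- pv_equiv track=rewrite | github.com/djmking-tai/workplace_converter | meta_workplace_converter.py | is_redundant_record
-- ===== SOURCE A (Python) =====
-- def is_redundant_record(prev_record, current_record):
--     """Check if the current record is redundant with the previous record"""
--     if not prev_record or not current_record:
--         return False
--     for key, value in current_record.items():
--         if not value:
--             continue
--         if key not in prev_record or prev_record[key] != value:
--             return False
--     return True
-- ===== SOURCE B (Python) =====
-- def is_redundant_record(prev_record, current_record):
--     """Check if the current record is redundant with the previous record"""
--     if not prev_record or not current_record:
--         return False
--     merged = {**prev_record, **{k: v for k, v in current_record.items() if v}}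
--     return merged == prev_record
-- ===== Notes on version B (the rewrite author's own statement) =====
-- stated objective: idiomatic
-- what changed: Instead of scanning current_record with per-key lookups and early returns, B builds a merged dict (prev overlaid with the truthy entries of current) and returns whether the merge left prev_record unchanged; Pre_ only excludes association lists with duplicate keys, which cannot arise from a Python dict.
import Mathlib
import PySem

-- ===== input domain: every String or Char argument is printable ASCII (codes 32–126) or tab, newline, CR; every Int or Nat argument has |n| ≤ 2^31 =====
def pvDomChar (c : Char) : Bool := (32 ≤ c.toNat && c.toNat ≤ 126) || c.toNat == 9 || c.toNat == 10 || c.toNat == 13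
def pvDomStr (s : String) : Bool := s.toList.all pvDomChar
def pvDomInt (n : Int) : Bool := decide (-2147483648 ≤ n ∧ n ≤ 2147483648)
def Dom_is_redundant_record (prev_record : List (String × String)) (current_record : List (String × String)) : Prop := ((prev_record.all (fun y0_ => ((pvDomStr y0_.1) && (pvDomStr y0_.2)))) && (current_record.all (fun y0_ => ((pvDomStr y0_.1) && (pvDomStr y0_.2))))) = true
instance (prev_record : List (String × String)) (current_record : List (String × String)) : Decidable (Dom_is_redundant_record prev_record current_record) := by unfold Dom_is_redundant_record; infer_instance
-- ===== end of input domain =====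

-- B replaces A's per-key scan with early returns by a merge-and-compare: overlay the
-- truthy entries of current_record onto prev_record and test whether prev is unchanged
-- (idiomatic; no speed claim).

-- ===== PORT A =====
-- dict lookup: first match in the association list (Python dicts have unique keys)
def pyDictGet? : List (String × String) → String → Option String
  | [], _ => none
  | (k, v) :: rest, key => if k = key then some v else pyDictGet? rest key

-- the for-loop over current_record.items() with its early 'return False'
def redundantLoopA (prev_record : List (String × String)) : List (String × String) → Bool
  | [] => true
  | (key, value) :: rest =>
      if value = "" then redundantLoopA prev_record rest   -- 'if not value: continue'
      else
        match pyDictGet? prev_record key with              -- 'key not in prev_record or prev_record[key] != value'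
        | none => false
        | some w => if w = value then redundantLoopA prev_record rest else false

def is_redundant_record (prev_record : List (String × String)) (current_record : List (String × String)) : Bool :=
  if prev_record = [] ∨ current_record = [] then false
  else redundantLoopA prev_record current_record

-- ===== PORT B =====
def is_redundant_record_alt (prev_record : List (String × String)) (current_record : List (String × String)) : Bool :=
  if prev_record = [] ∨ current_record = [] then false
  else
    let prevD : PySem.Dict String String := PySem.Dict.mk prev_record
    -- '{**prev_record, **{k: v for k, v in current_record.items() if v}}'
    let merged := (current_record.filter (fun p => p.2 ≠ "")).foldl
                    (fun d p => d.insert p.1 p.2) prevD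
    -- 'merged == prev_record' is Python's MAPPING equality (order ignored):
    -- same size and every item of merged present in prevD — exact for dicts.
    merged.size == prevD.size && merged.items.all (fun p => prevD.get? p.1 == some p.2)

-- ===== PRECONDITION & SPEC =====
-- Pre_ excludes association lists with duplicate keys in either argument: such lists
-- do not correspond to any Python dict, so A never runs on them.
def Pre_is_redundant_record (prev_record : List (String × String)) (current_record : List (String × String)) : Prop :=
  (prev_record.map Prod.fst).Nodup ∧ (current_record.map Prod.fst).Nodup
instance (prev_record : List (String × String)) (current_record : List (String × String)) : Decidable (Pre_is_redundant_record prev_record current_record) := by unfold Pre_is_redundant_record; infer_instance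
def pvWitness_is_redundant_record : (List (String × String)) × (List (String × String)) := ([("a", "1"), ("b", "2")], [("a", "1"), ("c", "")])

def Spec_is_redundant_record (prev_record : List (String × String)) (current_record : List (String × String)) (out : Bool) : Prop := out = is_redundant_record_alt prev_record current_record
instance (prev_record : List (String × String)) (current_record : List (String × String)) (out : Bool) : Decidable (Spec_is_redundant_record prev_record current_record out) := by unfold Spec_is_redundant_record; infer_instance

-- ===== CLAIM (what is proved, stated in full; the proofs are below) =====
def Claim_equal_is_redundant_record : Prop := ∀ (prev_record : List (String × String)) (current_record : List (String × String)), Dom_is_redundant_record prev_record current_record → Pre_is_redundant_record prev_record current_record → Spec_is_redundant_record prev_record current_record (is_redundant_record prev_record current_record)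

-- ===== LEMMAS AND PROOFS =====

-- A's lookup agrees with Dict.get? on the same list
theorem pyDictGet?_eq_get? (prev : List (String × String)) (k : String) :
    pyDictGet? prev k = (PySem.Dict.mk prev).get? k := by
  induction prev with
  | nil => simp [pyDictGet?, PySem.Dict.get?]
  | cons p rest ih =>
      obtain ⟨pk, pv⟩ := p
      rw [PySem.Dict.get?_mk_cons]
      simp [pyDictGet?, ih]

-- A's loop is 'every truthy item passes the lookup test'
theorem redundantLoopA_eq_all (prev cur : List (String × String)) :
    redundantLoopA prev cur
      = (cur.filter (fun p => p.2 ≠ "")).all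
          (fun p => (PySem.Dict.mk prev).get? p.1 == some p.2) := by
  induction cur with
  | nil => simp [redundantLoopA]
  | cons p rest ih =>
      obtain ⟨k, v⟩ := p
      by_cases hv : v = ""
      · subst hv; simpa [redundantLoopA] using ih
      · rw [show (((k, v) :: rest).filter (fun p => p.2 ≠ "")) =
            (k, v) :: rest.filter (fun p => p.2 ≠ "") by simp [hv]]
        simp only [redundantLoopA, if_neg hv, List.all_cons, ih, pyDictGet?_eq_get?]
        cases hget : (PySem.Dict.mk prev).get? k with
        | none => simp
        | some w => by_cases hw : w = v <;> simp [hw]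

-- inserting an item the dict already holds (unique keys) is the identity
theorem insert_of_get?_eq {d : PySem.Dict String String} {k v : String}
    (hnd : d.keys.Nodup) (h : d.get? k = some v) : d.insert k v = d := by
  apply PySem.Dict.ext
  have hc : d.contains k = true := by
    rw [PySem.Dict.contains_eq_isSome_get?, h]; rfl
  rw [PySem.Dict.items_insert_of_contains _ _ hc]
  have : ∀ p ∈ d.items, (if p.1 == k then (k, v) else p) = p := by
    intro p hp
    by_cases hpk : p.1 = k
    · have := PySem.Dict.get?_of_mem_items (d := d) (k := p.1) (v := p.2) (by simpa using hp) hnd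
      rw [hpk, h] at this
      obtain ⟨k1, v1⟩ := p
      simp only at hpk this
      simp [hpk, ← Option.some_inj.mp this]
    · simp [hpk]
  calc d.items.map (fun p => if p.1 == k then (k, v) else p) = d.items.map id :=
        List.map_congr_left (by simpa using this)
    _ = d.items := List.map_id _

-- get? after a fold of inserts whose keys avoid k
theorem get?_foldl_insert_not_mem (l : List (String × String)) (d : PySem.Dict String String)
    (k : String) (h : k ∉ l.map Prod.fst) :
    (l.foldl (fun d p => d.insert p.1 p.2) d).get? k = d.get? k := by
  induction l generalizing d with
  | nil => rfl
  | cons p rest ih =>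
      simp only [List.map_cons, List.mem_cons, not_or] at h
      rw [List.foldl_cons, ih _ h.2, PySem.Dict.get?_insert_of_ne _ _ h.1]

-- get? after a fold of inserts containing (k, v), keys nodup
theorem get?_foldl_insert_mem (l : List (String × String)) (d : PySem.Dict String String)
    (k v : String) (hnd : (l.map Prod.fst).Nodup) (hmem : (k, v) ∈ l) :
    (l.foldl (fun d p => d.insert p.1 p.2) d).get? k = some v := by
  induction l generalizing d with
  | nil => cases hmem
  | cons p rest ih =>
      simp only [List.map_cons, List.nodup_cons] at hnd
      rcases List.mem_cons.mp hmem with h | h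
      · subst h
        rw [List.foldl_cons, get?_foldl_insert_not_mem _ _ _ (by simpa using hnd.1),
          PySem.Dict.get?_insert_self]
      · rw [List.foldl_cons]; exact ih _ hnd.2 h

-- folding inserts of items the dict already holds is the identity
theorem foldl_insert_id (l : List (String × String)) (d : PySem.Dict String String)
    (hnd : d.keys.Nodup) (h : ∀ p ∈ l, d.get? p.1 = some p.2) :
    l.foldl (fun d p => d.insert p.1 p.2) d = d := by
  induction l with
  | nil => rfl
  | cons p rest ih =>
      rw [List.foldl_cons, insert_of_get?_eq hnd (h p (List.mem_cons_self))]
      exact ih fun q hq => h q (List.mem_cons_of_mem _ hq)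

-- main bridge: the merge-and-compare equals the all-truthy-items test
theorem merge_compare_eq (prev cur : List (String × String))
    (hp : (prev.map Prod.fst).Nodup) (hc : (cur.map Prod.fst).Nodup) :
    (let prevD : PySem.Dict String String := PySem.Dict.mk prev
     let merged := (cur.filter (fun p => p.2 ≠ "")).foldl (fun d p => d.insert p.1 p.2) prevD
     merged.size == prevD.size && merged.items.all (fun p => prevD.get? p.1 == some p.2))
      = (cur.filter (fun p => p.2 ≠ "")).all
          (fun p => (PySem.Dict.mk prev).get? p.1 == some p.2) := by
  simp only
  set prevD : PySem.Dict String String := PySem.Dict.mk prev with hprevD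
  have hndP : prevD.keys.Nodup := by
    simpa [hprevD, PySem.Dict.keys] using hp
  set f := cur.filter (fun p => p.2 ≠ "") with hf
  have hndF : (f.map Prod.fst).Nodup := by
    rw [hf]
    exact List.Nodup.sublist (List.Sublist.map Prod.fst List.filter_sublist) hc
  by_cases hall : f.all (fun p => prevD.get? p.1 == some p.2)
  · -- every truthy item already present: the fold is the identity
    have : f.foldl (fun d p => d.insert p.1 p.2) prevD = prevD :=
      foldl_insert_id f prevD hndP (by
        intro p hp'
        have := List.all_eq_true.mp hall p hp'
        simpa using this)
    rw [this, hall]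
    simp only [BEq.rfl, Bool.true_and, List.all_eq_true]
    intro p hp'
    have := PySem.Dict.get?_of_mem_items (d := prevD) (k := p.1) (v := p.2)
      (by simpa using hp') hndP
    simpa using this
  · -- some truthy item fails: merged differs from prevD at its key
    have hall' : f.all (fun p => prevD.get? p.1 == some p.2) = false := by
      simpa using hall
    rw [hall']
    rw [List.all_eq_false] at hall'
    obtain ⟨p, hpmem, hpfail⟩ := hall'
    obtain ⟨k, v⟩ := p
    have hfail : ¬ prevD.get? k = some v := by simpa using hpfail
    set merged := f.foldl (fun d p => d.insert p.1 p.2) prevD with hm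
    have hget : merged.get? k = some v := get?_foldl_insert_mem f prevD k v hndF hpmem
    have hmemM : (k, v) ∈ merged.items := PySem.Dict.mem_items_of_get?_eq_some _ hget
    have : merged.items.all (fun p => prevD.get? p.1 == some p.2) = false := by
      rw [List.all_eq_false]
      exact ⟨(k, v), hmemM, by simpa using hfail⟩
    simp [this]

-- ===== VERDICT (by name: the statement is the Claim_ definition above) =====
theorem is_redundant_record_spec : Claim_equal_is_redundant_record := by
  intro prev cur _ hpre
  unfold Spec_is_redundant_record is_redundant_record is_redundant_record_alt
  by_cases hg : prev = [] ∨ cur = []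
  · simp [hg]
  · simp only [if_neg hg]
    rw [redundantLoopA_eq_all, ← merge_compare_eq prev cur hpre.1 hpre.2]
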